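-- pv_equiv track=rewrite | github.com/HyungminAn/etchZBL | Figure/carbon_film/generate_bondinfo.py | get_batches_from_groups
-- ===== SOURCE A (Python) =====
-- def get_batches_from_groups(grouped_files, batch_size=100):
--     """
--     Creates batches based on grouped file indices.
--     Ensures that files with the same index are processed together.
--     """
--     sorted_indices = sorted(grouped_files.keys())
--     batches = []
--     current_batch = []
--     start_idx = None
--
--     for index in sorted_indices:
--         if start_idx is None:
--             start_idx = index
--         current_batch.extend(grouped_files[index])
--
--         if index > 0 and index % batch_size == 0:
--             batches.append((start_idx, index, current_batch))
--             current_batch = []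
--             start_idx = None  # Reset for new batch
--
--     if current_batch:
--         batches.append((start_idx, index, current_batch))
--
--     return batches
-- ===== SOURCE B (Python) =====
-- def get_batches_from_groups(grouped_files, batch_size=100):
--     """
--     Creates batches based on grouped file indices.
--     Two stages: first cut the sorted indices into segments (a segment is
--     closed right after any positive index divisible by batch_size), then
--     turn each segment into a batch; the leftover open segment becomes a
--     batch only if it actually holds files.
--     """
--     segments = []
--     seg = []
--     for k in sorted(grouped_files):
--         seg.append(k)
--         if k > 0 and k % batch_size == 0:
--             segments.append((seg, True))
--             seg = []
--     if seg:
--         segments.append((seg, False))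
--
--     batches = []
--     for keys, closed in segments:
--         files = [f for k in keys for f in grouped_files[k]]
--         if closed or files:
--             batches.append((keys[0], keys[-1], files))
--     return batches
-- ===== Notes on version B (the rewrite author's own statement) =====
-- stated objective: alternative
-- what changed: B first cuts the sorted index list into explicit (segment, closed) pairs and then maps each segment to a batch in a second pass, replacing A's single loop with a start_idx/None sentinel accumulator; Pre_ only excludes batch_size = 0 together with a positive index, where A raises ZeroDivisionError.
import Mathlib
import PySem

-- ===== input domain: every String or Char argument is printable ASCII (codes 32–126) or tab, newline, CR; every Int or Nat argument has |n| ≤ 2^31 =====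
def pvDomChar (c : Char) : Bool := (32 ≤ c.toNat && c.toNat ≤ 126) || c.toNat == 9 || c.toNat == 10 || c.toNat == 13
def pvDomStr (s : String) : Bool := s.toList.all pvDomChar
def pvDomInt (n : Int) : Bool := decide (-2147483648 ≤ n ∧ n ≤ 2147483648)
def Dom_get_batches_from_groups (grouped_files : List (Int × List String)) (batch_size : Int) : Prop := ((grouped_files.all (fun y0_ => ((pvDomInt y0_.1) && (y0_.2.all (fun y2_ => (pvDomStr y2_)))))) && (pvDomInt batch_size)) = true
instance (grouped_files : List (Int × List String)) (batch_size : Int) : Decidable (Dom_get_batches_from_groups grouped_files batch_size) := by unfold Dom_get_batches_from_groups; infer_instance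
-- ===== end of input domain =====

-- ===== PORT A =====
-- A's for-loop over the sorted indices, as structural recursion over the same
-- state (batches, current_batch, start_idx, last index seen).  The `.getD 0`
-- defaults are unreachable: Python's start_idx/index are always set when used.
def pvLoopA (d : PySem.Dict Int (List String)) (batch_size : Int)
    (batches : List (Int × Int × List String)) (current_batch : List String)
    (start_idx : Option Int) (last : Option Int) :
    List Int → List (Int × Int × List String)
  | [] =>
      if current_batch.isEmpty then batches
      else batches ++ [(start_idx.getD 0, last.getD 0, current_batch)]
  | index :: rest =>
      let s := start_idx.getD index            -- if start_idx is None: start_idx = index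
      let cb := current_batch ++ d.getD index  []
      if index > 0 ∧ PySem.Int.mod index batch_size = 0 then
        pvLoopA d batch_size (batches ++ [(s, index, cb)]) [] none (some index) rest
      else
        pvLoopA d batch_size batches cb (some s) (some index) rest

def get_batches_from_groups (grouped_files : List (Int × List String)) (batch_size : Int) : List (Int × Int × List String) :=
  let d := PySem.Dict.ofList grouped_files
  pvLoopA d batch_size [] [] none none (PySem.List.sorted d.keys (fun k => k) false)

-- ===== PORT B =====
-- B stage 1: cut the sorted index list into (segment, closed) pairs; a segment
-- is closed right after any positive index divisible by batch_size.
def pvSegs (batch_size : Int) (seg : List Int) : List Int → List (List Int × Bool)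
  | [] => if seg.isEmpty then [] else [(seg, false)]
  | k :: ks =>
      let seg' := seg ++ [k]
      if k > 0 ∧ PySem.Int.mod k batch_size = 0 then
        (seg', true) :: pvSegs batch_size [] ks
      else
        pvSegs batch_size seg' ks

-- B stage 2: map each segment to a batch; the open segment only if it has files.
-- (segments are nonempty, so keys[0] / keys[-1] are ported with unreachable defaults)
def get_batches_from_groups_alt (grouped_files : List (Int × List String)) (batch_size : Int) : List (Int × Int × List String) :=
  let d := PySem.Dict.ofList grouped_files
  (pvSegs batch_size [] (PySem.List.sorted d.keys (fun k => k) false)).foldl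
    (fun batches sc =>
      let files := sc.1.flatMap (fun k => d.getD k [])
      if sc.2 || !files.isEmpty then
        batches ++ [(sc.1.head?.getD 0, sc.1.getLast?.getD 0, files)]
      else batches) []

-- ===== PRECONDITION & SPEC =====
-- Pre_ excludes exactly the inputs where Python A raises ZeroDivisionError:
-- batch_size = 0 while some (positive) index reaches the `index % batch_size` test.
def Pre_get_batches_from_groups (grouped_files : List (Int × List String)) (batch_size : Int) : Prop :=
  batch_size ≠ 0 ∨ grouped_files.all (fun p => p.1 ≤ 0)
instance (grouped_files : List (Int × List String)) (batch_size : Int) : Decidable (Pre_get_batches_from_groups grouped_files batch_size) := by unfold Pre_get_batches_from_groups; infer_instance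

def pvWitness_get_batches_from_groups : (List (Int × List String)) × Int :=
  ([(1, ["a.xyz"]), (2, ["b.xyz", "c.xyz"]), (3, [])], 2)

def Spec_get_batches_from_groups (grouped_files : List (Int × List String)) (batch_size : Int) (out : List (Int × Int × List String)) : Prop := out = get_batches_from_groups_alt grouped_files batch_size
instance (grouped_files : List (Int × List String)) (batch_size : Int) (out : List (Int × Int × List String)) : Decidable (Spec_get_batches_from_groups grouped_files batch_size out) := by unfold Spec_get_batches_from_groups; infer_instance

-- ===== CLAIM (what is proved, stated in full; the proofs are below) =====
def Claim_equal_get_batches_from_groups : Prop := ∀ (grouped_files : List (Int × List String)) (batch_size : Int), Dom_get_batches_from_groups grouped_files batch_size → Pre_get_batches_from_groups grouped_files batch_size → Spec_get_batches_from_groups grouped_files batch_size (get_batches_from_groups grouped_files batch_size)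

-- ===== LEMMAS AND PROOFS =====
theorem pvLoop_eq_segs (d : PySem.Dict Int (List String)) (batch_size : Int) :
    ∀ (ks : List Int) (batches : List (Int × Int × List String)) (seg : List Int)
      (last : Option Int), (seg ≠ [] → last = seg.getLast?) →
    pvLoopA d batch_size batches (seg.flatMap (fun k => d.getD k [])) seg.head? last ks =
      (pvSegs batch_size seg ks).foldl
        (fun batches sc =>
          let files := sc.1.flatMap (fun k => d.getD k [])
          if sc.2 || !files.isEmpty then
            batches ++ [(sc.1.head?.getD 0, sc.1.getLast?.getD 0, files)]
          else batches) batches := by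
  intro ks
  induction ks with
  | nil =>
      intro batches seg last hlast
      cases seg with
      | nil => simp [pvLoopA, pvSegs]
      | cons a t =>
          rw [hlast (by simp)]
          simp only [pvLoopA, pvSegs, List.isEmpty_cons, Bool.false_eq_true, if_false,
            List.foldl_cons, List.foldl_nil, Bool.false_or]
          cases h : ((a :: t).flatMap (fun k => d.getD k [])).isEmpty
          · rw [if_neg (by simp [h]), if_pos (by simp [h])]
          · rw [if_pos (by simp [h]), if_neg (by simp [h])]
  | cons k rest ih =>
      intro batches seg last hlast
      simp only [pvLoopA, pvSegs]
      by_cases hcut : k > 0 ∧ PySem.Int.mod k batch_size = 0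
      · rw [if_pos hcut, if_pos hcut]
        have h1 : (seg ++ [k]).head?.getD 0 = seg.head?.getD k := by cases seg <;> simp
        have h2 : (seg ++ [k]).getLast?.getD 0 = k := by simp
        have h3 : (seg ++ [k]).flatMap (fun k => d.getD k []) =
            seg.flatMap (fun k => d.getD k []) ++ d.getD k [] := by simp
        have := ih (batches ++ [(seg.head?.getD k, k,
            seg.flatMap (fun k => d.getD k []) ++ d.getD k [])]) [] (some k) (by simp)
        simp only [List.flatMap_nil, List.head?_nil] at this
        rw [this, List.foldl_cons]
        simp only [h1, h2, h3, Bool.true_or, if_true]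
      · rw [if_neg hcut, if_neg hcut]
        have h1 : some (seg.head?.getD k) = (seg ++ [k]).head? := by cases seg <;> simp
        have h2 : (seg ++ [k]).flatMap (fun k => d.getD k []) =
            seg.flatMap (fun k => d.getD k []) ++ d.getD k [] := by simp
        have := ih batches (seg ++ [k]) (some k) (by simp)
        rw [← h1] at this
        rw [← h2]
        exact this

-- ===== VERDICT (by name: the statement is the Claim_ definition above) =====
theorem get_batches_from_groups_spec : Claim_equal_get_batches_from_groups := by
  intro grouped_files batch_size _ _
  unfold Spec_get_batches_from_groups get_batches_from_groups get_batches_from_groups_alt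
  have := pvLoop_eq_segs (PySem.Dict.ofList grouped_files) batch_size
    (PySem.List.sorted (PySem.Dict.ofList grouped_files).keys (fun k => k) false)
    [] [] none (by simp)
  simpa using this
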